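-- pv_equiv track=rewrite | github.com/jayMinOh/ai-contents-factory | backend/app/services/storyboard_generator_v2.py | _format_selected_items
-- ===== SOURCE A (Python) =====
-- from typing import Any, Dict, List, Optional
--
-- def _format_selected_items(selected: Dict[str, Any]) -> str:
--     """Format user-selected items from reference analysis."""
--     if not selected:
--         return ""
--
--     parts = ["## User-Selected Elements to Incorporate"]
--
--     if selected.get("hook_points"):
--         parts.append("### Selected Hooks (use for opening slides):")
--         for hook in selected["hook_points"][:2]:
--             if isinstance(hook, dict):
--                 parts.append(f"  - {hook.get('hook_type', '')}: {hook.get('description', '')[:100]}")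
--
--     if selected.get("triggers"):
--         parts.append("### Selected Emotional Triggers (use for emotional appeal):")
--         for trigger in selected["triggers"][:2]:
--             if isinstance(trigger, dict):
--                 parts.append(f"  - {trigger.get('trigger_type', '')}: {trigger.get('description', '')[:100]}")
--
--     if selected.get("selling_points"):
--         parts.append("### Selected Selling Points (use for benefit slides):")
--         for sp in selected["selling_points"][:3]:
--             if isinstance(sp, dict):
--                 parts.append(f"  - {sp.get('technique', '')}: {sp.get('description', '')[:100]}")
--
--     if selected.get("recommendations"):
--         parts.append("### Selected Recommendations (apply to structure):")
--         for rec in selected["recommendations"][:2]: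
--             if isinstance(rec, dict):
--                 parts.append(f"  - {rec.get('recommendation', '')[:150]}")
--
--     if selected.get("edge_points"):
--         parts.append("### Selected Differentiation Elements:")
--         for edge in selected["edge_points"][:2]:
--             if isinstance(edge, dict):
--                 parts.append(f"  - {edge.get('description', '')[:100]}")
--
--     return "\n".join(parts)
-- ===== SOURCE B (Python) =====
-- _SPECS = [
--     ("hook_points", "### Selected Hooks (use for opening slides):", 2, "hook_type", "description", 100),
--     ("triggers", "### Selected Emotional Triggers (use for emotional appeal):", 2, "trigger_type", "description", 100),
--     ("selling_points", "### Selected Selling Points (use for benefit slides):", 3, "technique", "description", 100),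
--     ("recommendations", "### Selected Recommendations (apply to structure):", 2, None, "recommendation", 150),
--     ("edge_points", "### Selected Differentiation Elements:", 2, None, "description", 100),
-- ]
--
--
-- def _sections(selected, specs):
--     """Recursively render the spec list as one string ('\\n'-prefixed blocks)."""
--     if not specs:
--         return ""
--     key, header, limit, type_key, desc_key, cut = specs[0]
--     rest = _sections(selected, specs[1:])
--     items = selected.get(key)
--     if not items:
--         return rest
--     body = "".join(
--         "\n  - "
--         + ((d.get(type_key, "") + ": ") if type_key is not None else "")
--         + d.get(desc_key, "")[:cut]
--         for d in items[:limit]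
--         if isinstance(d, dict)
--     )
--     return "\n" + header + body + rest
--
--
-- def _format_selected_items(selected):
--     """Format user-selected items from reference analysis."""
--     if not selected:
--         return ""
--     return "## User-Selected Elements to Incorporate" + _sections(selected, _SPECS)
-- ===== Notes on version B (the rewrite author's own statement) =====
-- stated objective: simpler
-- what changed: Replaced A's flat sequence of five copy-pasted if-blocks appending to a parts list joined at the end by a recursive renderer over a spec table that concatenates each '\n'-prefixed block string directly (no parts list, no join), with per-line field names held as data.
import Mathlib
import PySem

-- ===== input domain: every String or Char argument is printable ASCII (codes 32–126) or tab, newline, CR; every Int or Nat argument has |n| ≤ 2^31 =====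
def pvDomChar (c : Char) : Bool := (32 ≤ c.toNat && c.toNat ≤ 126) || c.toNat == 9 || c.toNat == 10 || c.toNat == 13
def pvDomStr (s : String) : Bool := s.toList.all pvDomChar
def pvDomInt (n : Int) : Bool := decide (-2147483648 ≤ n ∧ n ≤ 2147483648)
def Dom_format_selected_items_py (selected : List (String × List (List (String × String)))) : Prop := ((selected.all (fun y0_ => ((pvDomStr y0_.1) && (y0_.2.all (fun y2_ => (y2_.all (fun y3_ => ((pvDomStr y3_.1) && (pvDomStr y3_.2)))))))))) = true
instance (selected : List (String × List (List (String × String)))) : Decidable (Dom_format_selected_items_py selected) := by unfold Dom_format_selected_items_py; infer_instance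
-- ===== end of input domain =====

-- B rebuilds the markdown by RECURSION over a data table of section specs, concatenating
-- strings directly (no parts list, no '\n'.join); objective: simpler decomposition.

-- ===== PORT A =====
-- Literal transliteration of A. Under the type convention every item is a dict
-- (List (String × String)), so Python's 'isinstance(item, dict)' is always true and is omitted.
def format_selected_items_py (selected : List (String × List (List (String × String)))) : String :=
  if selected = [] then ""
  else
    let parts : List String := ["## User-Selected Elements to Incorporate"]
    let parts :=
      let hooks := PySem.Dict.getD ⟨selected⟩ "hook_points" []
      if hooks ≠ [] then
        (PySem.List.slice hooks none (some 2)).foldl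
          (fun ps hook => ps ++ ["  - " ++ PySem.Dict.getD ⟨hook⟩ "hook_type" "" ++ ": " ++
            PySem.Str.slice (PySem.Dict.getD ⟨hook⟩ "description" "") none (some 100)])
          (parts ++ ["### Selected Hooks (use for opening slides):"])
      else parts
    let parts :=
      let triggers := PySem.Dict.getD ⟨selected⟩ "triggers" []
      if triggers ≠ [] then
        (PySem.List.slice triggers none (some 2)).foldl
          (fun ps trigger => ps ++ ["  - " ++ PySem.Dict.getD ⟨trigger⟩ "trigger_type" "" ++ ": " ++
            PySem.Str.slice (PySem.Dict.getD ⟨trigger⟩ "description" "") none (some 100)])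
          (parts ++ ["### Selected Emotional Triggers (use for emotional appeal):"])
      else parts
    let parts :=
      let sps := PySem.Dict.getD ⟨selected⟩ "selling_points" []
      if sps ≠ [] then
        (PySem.List.slice sps none (some 3)).foldl
          (fun ps sp => ps ++ ["  - " ++ PySem.Dict.getD ⟨sp⟩ "technique" "" ++ ": " ++
            PySem.Str.slice (PySem.Dict.getD ⟨sp⟩ "description" "") none (some 100)])
          (parts ++ ["### Selected Selling Points (use for benefit slides):"])
      else parts
    let parts :=
      let recs := PySem.Dict.getD ⟨selected⟩ "recommendations" []
      if recs ≠ [] then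
        (PySem.List.slice recs none (some 2)).foldl
          (fun ps rec' => ps ++ ["  - " ++
            PySem.Str.slice (PySem.Dict.getD ⟨rec'⟩ "recommendation" "") none (some 150)])
          (parts ++ ["### Selected Recommendations (apply to structure):"])
      else parts
    let parts :=
      let edges := PySem.Dict.getD ⟨selected⟩ "edge_points" []
      if edges ≠ [] then
        (PySem.List.slice edges none (some 2)).foldl
          (fun ps edge => ps ++ ["  - " ++
            PySem.Str.slice (PySem.Dict.getD ⟨edge⟩ "description" "") none (some 100)])
          (parts ++ ["### Selected Differentiation Elements:"])
      else parts
    PySem.Str.join "\n" parts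

-- ===== PORT B =====
-- Source B's _SPECS table: (key, header, slice limit, optional type-prefix key, description key, cut).
def pvSpecsB : List (String × String × Int × Option String × String × Int) :=
  [ ("hook_points", "### Selected Hooks (use for opening slides):", 2, some "hook_type", "description", 100),
    ("triggers", "### Selected Emotional Triggers (use for emotional appeal):", 2, some "trigger_type", "description", 100),
    ("selling_points", "### Selected Selling Points (use for benefit slides):", 3, some "technique", "description", 100),
    ("recommendations", "### Selected Recommendations (apply to structure):", 2, none, "recommendation", 150),
    ("edge_points", "### Selected Differentiation Elements:", 2, none, "description", 100) ]

-- Source B's _sections: structural recursion over the spec list, building the string directly.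
-- 'isinstance(d, dict)' is always true under the type convention and is omitted.
def pvSections (selected : List (String × List (List (String × String)))) :
    List (String × String × Int × Option String × String × Int) → String
  | [] => ""
  | (key, header, limit, typeKey, descKey, cut) :: specs =>
    let rest := pvSections selected specs
    let items := PySem.Dict.getD ⟨selected⟩ key []
    if items = [] then rest
    else
      let body := PySem.Str.join ""
        ((PySem.List.slice items none (some limit)).map (fun d =>
          "\n  - " ++
          (match typeKey with
           | some tk => PySem.Dict.getD ⟨d⟩ tk "" ++ ": "
           | none => "") ++
          PySem.Str.slice (PySem.Dict.getD ⟨d⟩ descKey "") none (some cut)))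
      "\n" ++ header ++ body ++ rest

def format_selected_items_py_alt (selected : List (String × List (List (String × String)))) : String :=
  if selected = [] then ""
  else "## User-Selected Elements to Incorporate" ++ pvSections selected pvSpecsB

-- ===== PRECONDITION & SPEC =====
def Spec_format_selected_items_py (selected : List (String × List (List (String × String)))) (out : String) : Prop := out = format_selected_items_py_alt selected
instance (selected : List (String × List (List (String × String)))) (out : String) : Decidable (Spec_format_selected_items_py selected out) := by unfold Spec_format_selected_items_py; infer_instance

-- ===== CLAIM =====
def Claim_equal_format_selected_items_py : Prop := ∀ (selected : List (String × List (List (String × String)))), Dom_format_selected_items_py selected → Spec_format_selected_items_py selected (format_selected_items_py selected)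

-- ===== LEMMAS AND PROOFS =====

-- The string "\n<s1>\n<s2>…" : tail of a "\n".join starting after its first element.
def pvTailS : List String → String
  | [] => ""
  | s :: r => "\n" ++ s ++ pvTailS r

-- Plain concatenation of a list of strings (the value of "".join).
def pvCatS : List String → String
  | [] => ""
  | s :: r => s ++ pvCatS r

-- char-list versions, used only to prove the String-level lemmas
def pvTailC (l : List (List Char)) : List Char := (l.map (fun s => '\n' :: s)).flatten

theorem pvJoinC_newline (p : List Char) (l : List (List Char)) :
    PySem.Chars.join ['\n'] (p :: l) = p ++ pvTailC l := by
  induction l generalizing p with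
  | nil => simp [PySem.Chars.join_singleton, pvTailC]
  | cons q rest ih => simp [PySem.Chars.join_cons_cons, ih q, pvTailC]

theorem pvJoinC_empty (l : List (List Char)) : PySem.Chars.join [] l = l.flatten := by
  induction l with
  | nil => simp [PySem.Chars.join_nil]
  | cons p rest ih =>
    cases rest with
    | nil => simp [PySem.Chars.join_singleton]
    | cons q r => simp [PySem.Chars.join_cons_cons, ih]

theorem pvTailS_toList (l : List String) :
    (pvTailS l).toList = pvTailC (l.map String.toList) := by
  induction l with
  | nil => rfl
  | cons s r ih => simp [pvTailS, pvTailC, String.toList_append, ih]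

theorem pvCatS_toList (l : List String) :
    (pvCatS l).toList = (l.map String.toList).flatten := by
  induction l with
  | nil => rfl
  | cons s r ih => simp [pvCatS, String.toList_append, ih]

@[simp] theorem pvJoinS_newline (p : String) (l : List String) :
    PySem.Str.join "\n" (p :: l) = p ++ pvTailS l := by
  apply String.toList_inj.mp
  simp [PySem.Str.toList_join, String.toList_append, pvTailS_toList]
  exact pvJoinC_newline _ _

@[simp] theorem pvJoinS_empty (l : List String) :
    PySem.Str.join "" l = pvCatS l := by
  apply String.toList_inj.mp
  simp [PySem.Str.toList_join, pvCatS_toList]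
  exact pvJoinC_empty _

@[simp] theorem pvTailS_nil : pvTailS [] = "" := rfl

@[simp] theorem pvTailS_cons (s : String) (l : List String) :
    pvTailS (s :: l) = "\n" ++ s ++ pvTailS l := rfl

@[simp] theorem pvTailS_append (a b : List String) :
    pvTailS (a ++ b) = pvTailS a ++ pvTailS b := by
  induction a with
  | nil => simp
  | cons s r ih => simp [ih, String.append_assoc]

@[simp] theorem pvTailS_map {α : Type} (f : α → String) (l : List α) :
    pvTailS (l.map f) = pvCatS (l.map (fun x => "\n" ++ f x)) := by
  induction l with
  | nil => rfl
  | cons x r ih => simp [pvCatS, ih, String.append_assoc]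

-- the per-item line of a type-prefixed section, re-associated to Source B's shape
@[simp] theorem pvLinePrefixed (t d : String) :
    ("\n" : String) ++ ("  - " ++ t ++ ": " ++ d) = "\n  - " ++ (t ++ ": ") ++ d := by
  apply String.toList_inj.mp
  simp [String.toList_append]

-- the per-item line of a prefix-free section, re-associated to Source B's shape
@[simp] theorem pvLinePlain (d : String) :
    ("\n" : String) ++ ("  - " ++ d) = "\n  - " ++ d := by
  apply String.toList_inj.mp
  simp [String.toList_append]

-- ===== VERDICT =====
set_option maxHeartbeats 2000000 in
theorem format_selected_items_py_spec : Claim_equal_format_selected_items_py := by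
  intro selected _
  unfold Spec_format_selected_items_py format_selected_items_py format_selected_items_py_alt
  by_cases hsel : selected = []
  · simp [hsel]
  · simp only [if_neg hsel]
    simp only [pvSpecsB, pvSections, PySem.List.foldl_append_singleton_eq_map, ne_eq]
    split_ifs <;>
      simp [String.append_assoc]
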